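-- pv_equiv track=rewrite | github.com/fboiero/MIESC | benchmarks/complete_evaluation.py | map_check_to_swc
-- ===== SOURCE A (Python) =====
-- def map_check_to_swc(check: str) -> str:
--     """Map tool check to SWC ID."""
--     check = check.lower()
--     if "reentrancy" in check:
--         return "SWC-107"
--     elif any(x in check for x in ["arbitrary", "suicidal", "unprotected", "tx-origin"]):
--         return "SWC-105"
--     elif any(x in check for x in ["overflow", "underflow", "divide"]):
--         return "SWC-101"
--     elif any(x in check for x in ["timestamp", "block.timestamp"]):
--         return "SWC-116"
--     elif any(x in check for x in ["unchecked", "low-level", "delegatecall"]):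
--         return "SWC-104"
--     elif any(x in check for x in ["dos", "locked-ether", "denial"]):
--         return "SWC-113"
--     elif any(x in check for x in ["random", "blockhash", "weak-prng"]):
--         return "SWC-120"
--     elif any(x in check for x in ["front", "race"]):
--         return "SWC-114"
--     return "SWC-000"
-- ===== SOURCE B (Python) =====
-- KEYWORDS = [
--     ("reentrancy", 0),
--     ("arbitrary", 1), ("suicidal", 1), ("unprotected", 1), ("tx-origin", 1),
--     ("overflow", 2), ("underflow", 2), ("divide", 2),
--     ("timestamp", 3), ("block.timestamp", 3),
--     ("unchecked", 4), ("low-level", 4), ("delegatecall", 4),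
--     ("dos", 5), ("locked-ether", 5), ("denial", 5),
--     ("random", 6), ("blockhash", 6), ("weak-prng", 6),
--     ("front", 7), ("race", 7),
-- ]
--
-- SWC = ["SWC-107", "SWC-105", "SWC-101", "SWC-116",
--        "SWC-104", "SWC-113", "SWC-120", "SWC-114"]
--
-- def map_check_to_swc(check: str) -> str:
--     """Map tool check to SWC ID."""
--     c = check.lower()
--     hits = [p for kw, p in KEYWORDS if kw in c]
--     return SWC[min(hits)] if hits else "SWC-000"
-- ===== Notes on version B (the rewrite author's own statement) =====
-- stated objective: alternative
-- what changed: Instead of A's ordered short-circuit cascade of category tests, B scans a flat keyword list once, collects the priorities of ALL matching keywords, and selects the answer by taking the minimum priority as an index into the SWC name table (no early return, no per-category grouping).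
import Mathlib
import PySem

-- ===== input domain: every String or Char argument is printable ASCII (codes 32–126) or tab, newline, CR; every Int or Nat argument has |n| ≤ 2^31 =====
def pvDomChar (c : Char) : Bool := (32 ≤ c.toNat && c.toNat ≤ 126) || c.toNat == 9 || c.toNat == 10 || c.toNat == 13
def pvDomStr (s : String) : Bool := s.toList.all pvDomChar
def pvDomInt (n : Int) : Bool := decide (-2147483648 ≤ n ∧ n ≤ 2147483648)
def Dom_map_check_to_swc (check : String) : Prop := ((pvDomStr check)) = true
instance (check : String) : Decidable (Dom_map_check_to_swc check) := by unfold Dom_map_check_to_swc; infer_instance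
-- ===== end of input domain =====

-- B collects the priorities of all matching keywords from one flat list and indexes the SWC table by their minimum, instead of A's ordered short-circuit cascade; objective: alternative.
-- ===== PORT A =====
def map_check_to_swc (check : String) : String :=
  let check := PySem.Str.lower check
  if PySem.Str.isIn "reentrancy" check then "SWC-107"
  else if (["arbitrary", "suicidal", "unprotected", "tx-origin"].any (fun x => PySem.Str.isIn x check)) then "SWC-105"
  else if (["overflow", "underflow", "divide"].any (fun x => PySem.Str.isIn x check)) then "SWC-101"
  else if (["timestamp", "block.timestamp"].any (fun x => PySem.Str.isIn x check)) then "SWC-116"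
  else if (["unchecked", "low-level", "delegatecall"].any (fun x => PySem.Str.isIn x check)) then "SWC-104"
  else if (["dos", "locked-ether", "denial"].any (fun x => PySem.Str.isIn x check)) then "SWC-113"
  else if (["random", "blockhash", "weak-prng"].any (fun x => PySem.Str.isIn x check)) then "SWC-120"
  else if (["front", "race"].any (fun x => PySem.Str.isIn x check)) then "SWC-114"
  else "SWC-000"

-- ===== PORT B =====
def swcKeywords : List (String × Nat) :=
  [("reentrancy", 0),
   ("arbitrary", 1), ("suicidal", 1), ("unprotected", 1), ("tx-origin", 1),
   ("overflow", 2), ("underflow", 2), ("divide", 2),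
   ("timestamp", 3), ("block.timestamp", 3),
   ("unchecked", 4), ("low-level", 4), ("delegatecall", 4),
   ("dos", 5), ("locked-ether", 5), ("denial", 5),
   ("random", 6), ("blockhash", 6), ("weak-prng", 6),
   ("front", 7), ("race", 7)]

def swcNames : List String :=
  ["SWC-107", "SWC-105", "SWC-101", "SWC-116", "SWC-104", "SWC-113", "SWC-120", "SWC-114"]

-- hits = [p for kw, p in KEYWORDS if kw in c]
def swcHits (c : String) : List Nat :=
  swcKeywords.filterMap (fun kp => if PySem.Str.isIn kp.1 c then some kp.2 else none)

def map_check_to_swc_alt (check : String) : String :=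
  let c := PySem.Str.lower check
  let hits := swcHits c
  -- SWC[min(hits)] if hits else "SWC-000"; min(hits) is always a valid index, the getD default is a totality guard
  match PySem.List.min? hits (fun x => x) with
  | some m => swcNames.getD m "SWC-000"
  | none => "SWC-000"

-- ===== PRECONDITION & SPEC =====
def Spec_map_check_to_swc (check : String) (out : String) : Prop := out = map_check_to_swc_alt check
instance (check : String) (out : String) : Decidable (Spec_map_check_to_swc check out) := by unfold Spec_map_check_to_swc; infer_instance

-- ===== CLAIM =====
def Claim_equal_map_check_to_swc : Prop := ∀ (check : String), Dom_map_check_to_swc check → Spec_map_check_to_swc check (map_check_to_swc check)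

-- ===== LEMMAS AND PROOFS =====

lemma mem_swcHits (c : String) (x : Nat) :
    x ∈ swcHits c ↔ ∃ kp, kp ∈ swcKeywords ∧ PySem.Str.isIn kp.1 c = true ∧ kp.2 = x := by
  simp only [swcHits, List.mem_filterMap, Option.ite_none_right_eq_some, Prod.exists, Option.some_inj]

lemma min_swc_eq (l : List Nat) (k : Nat) (hk : k ∈ l) (hall : ∀ x ∈ l, k ≤ x) :
    PySem.List.min? l (fun x => x) = some k := by
  cases h : PySem.List.min? l (fun x => x) with
  | none =>
      rw [PySem.List.min?_eq_none_iff] at h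
      subst h; cases hk
  | some m =>
      have hm := PySem.List.min?_mem h
      have h1 := PySem.List.min?_isMin h k hk
      have h2 := hall m hm
      simp only at h1
      exact congrArg some (Nat.le_antisymm h1 h2)

lemma hit_of (c kw : String) (k : Nat) (hmem : (kw, k) ∈ swcKeywords)
    (hin : PySem.Str.isIn kw c = true) : k ∈ swcHits c :=
  (mem_swcHits c k).2 ⟨(kw, k), hmem, hin, rfl⟩

lemma finish_case (c : String) (k : Nat) (hk : k ∈ swcHits c)
    (hall : ∀ x ∈ swcHits c, k ≤ x) :
    (match PySem.List.min? (swcHits c) (fun x => x) with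
     | some m => swcNames.getD m "SWC-000"
     | none => "SWC-000") = swcNames.getD k "SWC-000" := by
  rw [min_swc_eq _ k hk hall]

-- ===== VERDICT =====
theorem map_check_to_swc_spec : Claim_equal_map_check_to_swc := by
  intro check _
  unfold Spec_map_check_to_swc map_check_to_swc map_check_to_swc_alt
  dsimp only
  set c := PySem.Str.lower check with hc
  split_ifs with h1 h2 h3 h4 h5 h6 h7 h8 <;>
    simp only [List.any_cons, List.any_nil, Bool.or_eq_true,
      not_or, Bool.not_eq_true, Bool.false_eq_true, or_false] at *
  · rw [finish_case c 0 (hit_of c "reentrancy" 0 (by decide) h1) (fun x _ => Nat.zero_le x)]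
    rfl
  · rcases h2 with (h|h|h|h)
    · rw [finish_case c 1 (hit_of c "arbitrary" 1 (by decide) h) (by intro x hx; rw [mem_swcHits] at hx; obtain ⟨⟨kw, p⟩, hmem, hin, rfl⟩ := hx; fin_cases hmem <;> first | omega | simp_all)]
      rfl
    · rw [finish_case c 1 (hit_of c "suicidal" 1 (by decide) h) (by intro x hx; rw [mem_swcHits] at hx; obtain ⟨⟨kw, p⟩, hmem, hin, rfl⟩ := hx; fin_cases hmem <;> first | omega | simp_all)]
      rfl
    · rw [finish_case c 1 (hit_of c "unprotected" 1 (by decide) h) (by intro x hx; rw [mem_swcHits] at hx; obtain ⟨⟨kw, p⟩, hmem, hin, rfl⟩ := hx; fin_cases hmem <;> first | omega | simp_all)]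
      rfl
    · rw [finish_case c 1 (hit_of c "tx-origin" 1 (by decide) h) (by intro x hx; rw [mem_swcHits] at hx; obtain ⟨⟨kw, p⟩, hmem, hin, rfl⟩ := hx; fin_cases hmem <;> first | omega | simp_all)]
      rfl
  · rcases h3 with (h|h|h)
    · rw [finish_case c 2 (hit_of c "overflow" 2 (by decide) h) (by intro x hx; rw [mem_swcHits] at hx; obtain ⟨⟨kw, p⟩, hmem, hin, rfl⟩ := hx; fin_cases hmem <;> first | omega | simp_all)]
      rfl
    · rw [finish_case c 2 (hit_of c "underflow" 2 (by decide) h) (by intro x hx; rw [mem_swcHits] at hx; obtain ⟨⟨kw, p⟩, hmem, hin, rfl⟩ := hx; fin_cases hmem <;> first | omega | simp_all)]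
      rfl
    · rw [finish_case c 2 (hit_of c "divide" 2 (by decide) h) (by intro x hx; rw [mem_swcHits] at hx; obtain ⟨⟨kw, p⟩, hmem, hin, rfl⟩ := hx; fin_cases hmem <;> first | omega | simp_all)]
      rfl
  · rcases h4 with (h|h)
    · rw [finish_case c 3 (hit_of c "timestamp" 3 (by decide) h) (by intro x hx; rw [mem_swcHits] at hx; obtain ⟨⟨kw, p⟩, hmem, hin, rfl⟩ := hx; fin_cases hmem <;> first | omega | simp_all)]
      rfl
    · rw [finish_case c 3 (hit_of c "block.timestamp" 3 (by decide) h) (by intro x hx; rw [mem_swcHits] at hx; obtain ⟨⟨kw, p⟩, hmem, hin, rfl⟩ := hx; fin_cases hmem <;> first | omega | simp_all)]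
      rfl
  · rcases h5 with (h|h|h)
    · rw [finish_case c 4 (hit_of c "unchecked" 4 (by decide) h) (by intro x hx; rw [mem_swcHits] at hx; obtain ⟨⟨kw, p⟩, hmem, hin, rfl⟩ := hx; fin_cases hmem <;> first | omega | simp_all)]
      rfl
    · rw [finish_case c 4 (hit_of c "low-level" 4 (by decide) h) (by intro x hx; rw [mem_swcHits] at hx; obtain ⟨⟨kw, p⟩, hmem, hin, rfl⟩ := hx; fin_cases hmem <;> first | omega | simp_all)]
      rfl
    · rw [finish_case c 4 (hit_of c "delegatecall" 4 (by decide) h) (by intro x hx; rw [mem_swcHits] at hx; obtain ⟨⟨kw, p⟩, hmem, hin, rfl⟩ := hx; fin_cases hmem <;> first | omega | simp_all)]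
      rfl
  · rcases h6 with (h|h|h)
    · rw [finish_case c 5 (hit_of c "dos" 5 (by decide) h) (by intro x hx; rw [mem_swcHits] at hx; obtain ⟨⟨kw, p⟩, hmem, hin, rfl⟩ := hx; fin_cases hmem <;> first | omega | simp_all)]
      rfl
    · rw [finish_case c 5 (hit_of c "locked-ether" 5 (by decide) h) (by intro x hx; rw [mem_swcHits] at hx; obtain ⟨⟨kw, p⟩, hmem, hin, rfl⟩ := hx; fin_cases hmem <;> first | omega | simp_all)]
      rfl
    · rw [finish_case c 5 (hit_of c "denial" 5 (by decide) h) (by intro x hx; rw [mem_swcHits] at hx; obtain ⟨⟨kw, p⟩, hmem, hin, rfl⟩ := hx; fin_cases hmem <;> first | omega | simp_all)]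
      rfl
  · rcases h7 with (h|h|h)
    · rw [finish_case c 6 (hit_of c "random" 6 (by decide) h) (by intro x hx; rw [mem_swcHits] at hx; obtain ⟨⟨kw, p⟩, hmem, hin, rfl⟩ := hx; fin_cases hmem <;> first | omega | simp_all)]
      rfl
    · rw [finish_case c 6 (hit_of c "blockhash" 6 (by decide) h) (by intro x hx; rw [mem_swcHits] at hx; obtain ⟨⟨kw, p⟩, hmem, hin, rfl⟩ := hx; fin_cases hmem <;> first | omega | simp_all)]
      rfl
    · rw [finish_case c 6 (hit_of c "weak-prng" 6 (by decide) h) (by intro x hx; rw [mem_swcHits] at hx; obtain ⟨⟨kw, p⟩, hmem, hin, rfl⟩ := hx; fin_cases hmem <;> first | omega | simp_all)]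
      rfl
  · rcases h8 with (h|h)
    · rw [finish_case c 7 (hit_of c "front" 7 (by decide) h) (by intro x hx; rw [mem_swcHits] at hx; obtain ⟨⟨kw, p⟩, hmem, hin, rfl⟩ := hx; fin_cases hmem <;> first | omega | simp_all)]
      rfl
    · rw [finish_case c 7 (hit_of c "race" 7 (by decide) h) (by intro x hx; rw [mem_swcHits] at hx; obtain ⟨⟨kw, p⟩, hmem, hin, rfl⟩ := hx; fin_cases hmem <;> first | omega | simp_all)]
      rfl
  · have hnil : swcHits c = [] := by
      rw [List.eq_nil_iff_forall_not_mem]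
      intro x hx
      rw [mem_swcHits] at hx
      obtain ⟨⟨kw, p⟩, hmem, hin, rfl⟩ := hx
      fin_cases hmem <;> simp_all
    rw [hnil]
    rfl
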